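-- pv_equiv track=rewrite | github.com/KeyuHu616/DSAA2012_Final_Project | storygen/script_director/llm_parser_local.py | _get_characters_in_scene
-- ===== SOURCE A (Python) =====
-- from typing import Dict, List, Any, Optional
--
-- def _get_characters_in_scene(scene_content: str, characters: List[str], scene_index: int = 0) -> List[str]:
--     """
--     Identify which characters appear in this scene.
--     Handles multi-person scenes by checking for:
--     - Explicit character name mentions
--     - "and" conjunction (e.g., "Jack and Sara")
--     - "with" construction (e.g., "Jack with Sara")
--     - Pronouns after first scene (implying same characters)
--     """
--     scene_lower = scene_content.lower()
--     present_chars = []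
--
--     # First pass: check for explicit character name mentions
--     for char_name in characters:
--         # Check if name appears in angle brackets or as standalone word
--         if f'<{char_name.lower()}>' in scene_lower or f' {char_name.lower()} ' in scene_lower:
--             present_chars.append(char_name)
--         elif char_name.lower() in scene_lower and len(char_name) > 3:  # Avoid matching pronouns
--             present_chars.append(char_name)
--
--     # Second pass: check for "X and Y" or "X with Y" patterns
--     if len(present_chars) == 0 and len(characters) > 1:
--         # Check if script mentions multiple characters using "and" or "with"
--         if ' and ' in scene_lower:
--             # Try to match character pairs
--             for i, char1 in enumerate(characters):
--                 for char2 in characters[i+1:]: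
--                     if char1.lower() in scene_lower and char2.lower() in scene_lower:
--                         if char1 not in present_chars:
--                             present_chars.append(char1)
--                         if char2 not in present_chars:
--                             present_chars.append(char2)
--
--         # Check for "with" pattern
--         elif ' with ' in scene_lower:
--             # First character in scene is the subject, "with" indicates companion
--             if len(characters) >= 1:
--                 present_chars.append(characters[0])
--                 # The companion might be mentioned after "with"
--                 for char in characters[1:]:
--                     if char.lower() in scene_lower:
--                         present_chars.append(char)
--                         break
--
--     # Third pass: for scenes after the first without explicit mentions,
--     # assume all characters from the story are present
--     if not present_chars and characters:
--         # If it's a multi-character story and this isn't the first scene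
--         if scene_index > 0 and len(characters) > 1:
--             present_chars = characters  # Assume all characters continue
--         elif characters:
--             present_chars = [characters[0]]
--
--     return present_chars
-- ===== SOURCE B (Python) =====
-- from typing import List
--
-- def _get_characters_in_scene(scene_content: str, characters: List[str], scene_index: int = 0) -> List[str]:
--     low = scene_content.lower()
--     explicit = [c for c in characters
--                 if f'<{c.lower()}>' in low or f' {c.lower()} ' in low
--                 or (c.lower() in low and len(c) > 3)]
--     if explicit:
--         return explicit
--     if len(characters) > 1:
--         if ' and ' in low:
--             matches = [c for c in characters if c.lower() in low]
--             if len(matches) >= 2: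
--                 return list(dict.fromkeys(matches))
--         elif ' with ' in low:
--             companion = next((c for c in characters[1:] if c.lower() in low), None)
--             return [characters[0]] if companion is None else [characters[0], companion]
--     if not characters:
--         return []
--     if scene_index > 0 and len(characters) > 1:
--         return list(characters)
--     return [characters[0]]
-- ===== Notes on version B (the rewrite author's own statement) =====
-- stated objective: simpler
-- what changed: B replaces A's accumulator loops with filter comprehensions and early returns, and replaces the nested O(k^2) 'and'-branch pair loop with a single matches filter, a count check and an ordered dedup (dict.fromkeys).
import Mathlib
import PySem

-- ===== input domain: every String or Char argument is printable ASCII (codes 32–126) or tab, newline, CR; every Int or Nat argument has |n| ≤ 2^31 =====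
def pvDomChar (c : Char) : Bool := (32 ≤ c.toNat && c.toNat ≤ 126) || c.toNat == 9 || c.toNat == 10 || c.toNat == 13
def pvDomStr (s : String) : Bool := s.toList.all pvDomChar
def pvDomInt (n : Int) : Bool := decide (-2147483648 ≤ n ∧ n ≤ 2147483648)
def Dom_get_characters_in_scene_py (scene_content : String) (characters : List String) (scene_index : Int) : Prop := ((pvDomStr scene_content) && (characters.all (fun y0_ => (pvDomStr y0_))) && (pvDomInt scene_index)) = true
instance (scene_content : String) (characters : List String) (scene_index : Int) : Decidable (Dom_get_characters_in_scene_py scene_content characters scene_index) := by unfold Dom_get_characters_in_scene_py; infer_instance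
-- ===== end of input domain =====

-- B replaces A's accumulator loops by filter comprehensions and, in the " and " branch,
-- replaces the nested O(k^2) pair loop by one matches-filter plus an ordered dedup (objective: simpler).

-- shared primitive tests (each is one Python substring test, used verbatim by both sources)
-- char_name.lower() in scene_lower
def pvM (low : List Char) (c : String) : Bool :=
  PySem.Chars.isIn (PySem.Chars.lower c.toList) low
-- f'<{name}>' in scene_lower  or  f' {name} ' in scene_lower
def pvCondExplicit (low : List Char) (c : String) : Bool :=
  PySem.Chars.isIn ('<' :: PySem.Chars.lower c.toList ++ ['>']) low ||
  PySem.Chars.isIn (' ' :: PySem.Chars.lower c.toList ++ [' ']) low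
-- name.lower() in scene_lower and len(name) > 3
def pvCondSub (low : List Char) (c : String) : Bool :=
  pvM low c && decide (3 < c.toList.length)

-- ===== PORT A =====
-- first pass: append to present_chars under the if/elif chain
def pvA_pass1 (low : List Char) (chars : List String) : List String :=
  chars.foldl (fun acc c =>
    if pvCondExplicit low c then acc ++ [c]
    else if pvCondSub low c then acc ++ [c]
    else acc) []

-- body of the nested pair loop: 'if char1 not in …: append; if char2 not in …: append'
-- ('if x not in list: list.append(x)' is exactly PySem.Set.add on the list)
def pvA_pairStep (low : List Char) (c1 : String) (a : List String) (c2 : String) : List String :=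
  if pvM low c1 && pvM low c2 then PySem.Set.add (PySem.Set.add a c1) c2 else a

-- 'for i, char1 in enumerate(characters): for char2 in characters[i+1:]: …'
-- (iteration over each element with its strict tail, state threaded through)
def pvA_pairs (low : List Char) : List String → List String → List String
  | acc, [] => acc
  | acc, c1 :: rest => pvA_pairs low (rest.foldl (pvA_pairStep low c1) acc) rest

-- 'for char in characters[1:]: if …: append; break'
def pvA_companion (low : List Char) : List String → List String
  | [] => []
  | c :: rest => if pvM low c then [c] else pvA_companion low rest

-- second pass
def pvA_second (low : List Char) (p1 : List String) (chars : List String) : List String :=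
  if p1.length = 0 ∧ 1 < chars.length then
    if PySem.Chars.isIn " and ".toList low then pvA_pairs low p1 chars
    else if PySem.Chars.isIn " with ".toList low then
      match chars with
      | [] => p1                                  -- guard 'len(characters) >= 1'
      | c0 :: rest => p1 ++ c0 :: pvA_companion low rest
    else p1
  else p1

-- third pass
def pvA_third (p2 : List String) (chars : List String) (si : Int) : List String :=
  if p2 = [] ∧ chars ≠ [] then
    if 0 < si ∧ 1 < chars.length then chars else [chars.headI]
  else p2

def get_characters_in_scene_py (scene_content : String) (characters : List String) (scene_index : Int) : List String :=
  pvA_third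
    (pvA_second (PySem.Chars.lower scene_content.toList)
      (pvA_pass1 (PySem.Chars.lower scene_content.toList) characters) characters)
    characters scene_index

-- ===== PORT B =====
-- explicit = [c for c in characters if <…> or ' … ' or (… and len > 3)]
def pvB_explicit (low : List Char) (chars : List String) : List String :=
  chars.filter (fun c => pvCondExplicit low c || pvCondSub low c)

-- matches = [c for c in characters if c.lower() in low]
def pvB_matches (low : List Char) (chars : List String) : List String :=
  chars.filter (pvM low)

-- the early-returning second block, as an Option
def pvB_second (low : List Char) (chars : List String) : Option (List String) :=
  if 1 < chars.length then
    if PySem.Chars.isIn " and ".toList low then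
      if 2 ≤ (pvB_matches low chars).length then
        some (PySem.List.dedup (pvB_matches low chars))   -- list(dict.fromkeys(matches))
      else none
    else if PySem.Chars.isIn " with ".toList low then
      some (match chars.tail.find? (pvM low) with         -- next((c for c in characters[1:] …), None)
            | some comp => [chars.headI, comp]
            | none => [chars.headI])
    else none
  else none

def pvB_main (low : List Char) (chars : List String) (si : Int) : List String :=
  if pvB_explicit low chars ≠ [] then pvB_explicit low chars
  else
    match pvB_second low chars with
    | some r => r
    | none =>
      if chars = [] then []
      else if 0 < si ∧ 1 < chars.length then chars
      else [chars.headI]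

def get_characters_in_scene_py_alt (scene_content : String) (characters : List String) (scene_index : Int) : List String :=
  pvB_main (PySem.Chars.lower scene_content.toList) characters scene_index

-- ===== PRECONDITION & SPEC =====
def Spec_get_characters_in_scene_py (scene_content : String) (characters : List String) (scene_index : Int) (out : List String) : Prop := out = get_characters_in_scene_py_alt scene_content characters scene_index
instance (scene_content : String) (characters : List String) (scene_index : Int) (out : List String) : Decidable (Spec_get_characters_in_scene_py scene_content characters scene_index out) := by unfold Spec_get_characters_in_scene_py; infer_instance

-- ===== CLAIM (what is proved, stated in full; the proofs are below) =====
def Claim_equal_get_characters_in_scene_py : Prop := ∀ (scene_content : String) (characters : List String) (scene_index : Int), Dom_get_characters_in_scene_py scene_content characters scene_index → Spec_get_characters_in_scene_py scene_content characters scene_index (get_characters_in_scene_py scene_content characters scene_index)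

-- ===== LEMMAS AND PROOFS =====

theorem pv_bnot {b : Bool} (h : ¬ b = true) : b = false := by
  cases b <;> simp_all

theorem pv_add_of_mem {s : List String} {x : String} (h : x ∈ s) : PySem.Set.add s x = s := by
  simp [PySem.Set.add, PySem.Set.contains, h]

theorem pv_pass1_eq (low : List Char) (chars : List String) :
    pvA_pass1 low chars = pvB_explicit low chars := by
  unfold pvA_pass1 pvB_explicit
  have hf : (fun (acc : List String) c =>
      if pvCondExplicit low c then acc ++ [c]
      else if pvCondSub low c then acc ++ [c] else acc)
      = fun (acc : List String) c =>
        if (pvCondExplicit low c || pvCondSub low c) then acc ++ [c] else acc := by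
    funext a c
    by_cases h1 : pvCondExplicit low c <;> by_cases h2 : pvCondSub low c <;> simp [h1, h2]
  rw [hf]
  simpa using PySem.List.foldl_append_if (fun c => pvCondExplicit low c || pvCondSub low c) id chars []

theorem pv_fold_nofire (low : List Char) (c1 : String) (h : pvM low c1 = false)
    (l : List String) (acc : List String) :
    l.foldl (pvA_pairStep low c1) acc = acc := by
  induction l generalizing acc with
  | nil => rfl
  | cons c2 rest ih => simp [List.foldl_cons, pvA_pairStep, h, ih]

theorem pv_fold_stable (low : List Char) (c1 : String) (l : List String) (acc : List String)
    (h1 : pvM low c1 = true → c1 ∈ acc) (h : ∀ c ∈ l, pvM low c = true → c ∈ acc) :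
    l.foldl (pvA_pairStep low c1) acc = acc := by
  induction l with
  | nil => rfl
  | cons c2 rest ih =>
    have hstep : pvA_pairStep low c1 acc c2 = acc := by
      unfold pvA_pairStep
      by_cases hm1 : pvM low c1 = true
      · by_cases hm2 : pvM low c2 = true
        · rw [pv_add_of_mem (h1 hm1), pv_add_of_mem (h c2 (by simp) hm2)]
          simp [hm1, hm2]
        · simp [hm1, pv_bnot hm2]
      · simp [pv_bnot hm1]
    rw [List.foldl_cons, hstep]
    exact ih (fun c hc => h c (by simp [hc]))

theorem pv_pairs_stable (low : List Char) (l : List String) (acc : List String)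
    (h : ∀ c ∈ l, pvM low c = true → c ∈ acc) :
    pvA_pairs low acc l = acc := by
  induction l with
  | nil => rfl
  | cons c1 rest ih =>
    unfold pvA_pairs
    rw [pv_fold_stable low c1 rest acc (fun hm => h c1 (by simp) hm)
        (fun c hc hm => h c (by simp [hc]) hm)]
    exact ih (fun c hc hm => h c (by simp [hc]) hm)

theorem pv_fold_from (low : List Char) (c1 : String) (l : List String) (s : List String)
    (h1 : pvM low c1 = true) (hs : c1 ∈ s) :
    l.foldl (pvA_pairStep low c1) (PySem.Set.ofList s)
      = PySem.Set.ofList (s ++ l.filter (pvM low)) := by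
  induction l generalizing s with
  | nil => simp
  | cons c2 rest ih =>
    rw [List.foldl_cons]
    by_cases hm2 : pvM low c2 = true
    · have hstep : pvA_pairStep low c1 (PySem.Set.ofList s) c2 = PySem.Set.ofList (s ++ [c2]) := by
        unfold pvA_pairStep
        rw [if_pos (by simp [h1, hm2]),
            pv_add_of_mem ((PySem.Set.mem_ofList s c1).mpr hs),
            ← PySem.Set.ofList_append_singleton]
      rw [hstep, ih (s ++ [c2]) (by simp [hs]), List.filter_cons_of_pos hm2]
      simp
    · rw [show pvA_pairStep low c1 (PySem.Set.ofList s) c2 = PySem.Set.ofList s by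
            simp [pvA_pairStep, pv_bnot hm2],
          ih s hs, List.filter_cons_of_neg (by simp [hm2])]

theorem pv_fold_start (low : List Char) (c1 : String) (l : List String)
    (h1 : pvM low c1 = true) :
    l.foldl (pvA_pairStep low c1) []
      = if l.filter (pvM low) = [] then []
        else PySem.Set.ofList (c1 :: l.filter (pvM low)) := by
  induction l with
  | nil => simp
  | cons c2 rest ih =>
    by_cases hm2 : pvM low c2 = true
    · rw [List.foldl_cons]
      have hstep : pvA_pairStep low c1 [] c2 = PySem.Set.ofList [c1, c2] := by
        unfold pvA_pairStep
        rw [if_pos (by simp [h1, hm2])]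
        show PySem.Set.add (PySem.Set.add [] c1) c2 = _
        rw [show PySem.Set.add ([] : List String) c1 = PySem.Set.ofList [c1] from rfl,
            ← PySem.Set.ofList_append_singleton]
        rfl
      rw [hstep, pv_fold_from low c1 rest [c1, c2] h1 (by simp),
          List.filter_cons_of_pos hm2]
      simp
    · rw [List.foldl_cons,
          show pvA_pairStep low c1 [] c2 = [] by simp [pvA_pairStep, pv_bnot hm2],
          ih, List.filter_cons_of_neg (by simp [hm2])]

theorem pv_pairs_main (low : List Char) (chars : List String) :
    pvA_pairs low [] chars
      = if 2 ≤ (chars.filter (pvM low)).length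
        then PySem.Set.ofList (chars.filter (pvM low)) else [] := by
  induction chars with
  | nil => simp [pvA_pairs]
  | cons c1 rest ih =>
    unfold pvA_pairs
    by_cases hm1 : pvM low c1 = true
    · rw [pv_fold_start low c1 rest hm1]
      by_cases hre : rest.filter (pvM low) = []
      · rw [if_pos hre]
        have hnone : ∀ c ∈ rest, pvM low c = true → (c : String) ∈ ([] : List String) := by
          intro c hc hm
          exact absurd (List.mem_filter.mpr ⟨hc, hm⟩) (by simp [hre])
        rw [pv_pairs_stable low rest [] hnone, List.filter_cons_of_pos hm1, hre]
        simp
      · rw [if_neg hre]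
        have hsub : ∀ c ∈ rest, pvM low c = true →
            c ∈ PySem.Set.ofList (c1 :: rest.filter (pvM low)) := by
          intro c hc hm
          exact (PySem.Set.mem_ofList _ c).mpr (by simp [List.mem_filter.mpr ⟨hc, hm⟩])
        rw [pv_pairs_stable low rest _ hsub, List.filter_cons_of_pos hm1]
        have hlen : 2 ≤ (c1 :: rest.filter (pvM low)).length := by
          have := List.length_pos_iff.mpr hre
          simp only [List.length_cons]; omega
        rw [if_pos hlen]
    · have hm1' := pv_bnot hm1
      rw [pv_fold_nofire low c1 hm1' rest [], ih, List.filter_cons_of_neg (by simp [hm1'])]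

theorem pv_comp_eq (low : List Char) (l : List String) :
    pvA_companion low l
      = (match l.find? (pvM low) with | some c => [c] | none => []) := by
  induction l with
  | nil => rfl
  | cons c rest ih =>
    by_cases hm : pvM low c = true
    · simp [pvA_companion, hm, List.find?_cons_of_pos hm]
    · rw [show pvA_companion low (c :: rest) = pvA_companion low rest by
            simp [pvA_companion, pv_bnot hm],
          List.find?_cons_of_neg (by simp [pv_bnot hm])]
      exact ih

theorem pv_third_ne {p2 chars : List String} {si : Int} (h : p2 ≠ []) :
    pvA_third p2 chars si = p2 := by
  unfold pvA_third
  rw [if_neg (fun hc => h hc.1)]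

theorem pv_third_nil (chars : List String) (si : Int) :
    pvA_third [] chars si
      = if chars = [] then []
        else if 0 < si ∧ 1 < chars.length then chars else [chars.headI] := by
  unfold pvA_third
  by_cases h : chars = [] <;> simp [h]

theorem pv_bmain_ex {low : List Char} {chars : List String} (si : Int)
    (h : pvB_explicit low chars ≠ []) : pvB_main low chars si = pvB_explicit low chars := by
  unfold pvB_main
  rw [if_pos h]

theorem pv_bmain_some {low : List Char} {chars : List String} {r : List String} (si : Int)
    (h1 : pvB_explicit low chars = []) (h2 : pvB_second low chars = some r) :
    pvB_main low chars si = r := by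
  unfold pvB_main
  rw [if_neg (by simp [h1]), h2]

theorem pv_bmain_none {low : List Char} {chars : List String} (si : Int)
    (h1 : pvB_explicit low chars = []) (h2 : pvB_second low chars = none) :
    pvB_main low chars si
      = if chars = [] then []
        else if 0 < si ∧ 1 < chars.length then chars else [chars.headI] := by
  unfold pvB_main
  rw [if_neg (by simp [h1]), h2]

theorem pv_main_eq (low : List Char) (chars : List String) (si : Int) :
    pvA_third (pvA_second low (pvA_pass1 low chars) chars) chars si
      = pvB_main low chars si := by
  rw [pv_pass1_eq]
  by_cases hex : pvB_explicit low chars = []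
  · rw [hex]
    by_cases hlen : 1 < chars.length
    · by_cases hand : PySem.Chars.isIn " and ".toList low = true
      · have hA2 : pvA_second low [] chars = pvA_pairs low [] chars := by
          unfold pvA_second
          rw [if_pos ⟨rfl, hlen⟩, if_pos hand]
        rw [hA2, pv_pairs_main]
        by_cases hms : 2 ≤ (chars.filter (pvM low)).length
        · have hne : PySem.Set.ofList (chars.filter (pvM low)) ≠ [] := by
            rcases List.exists_mem_of_length_pos (l := chars.filter (pvM low)) (by omega)
              with ⟨x, hx⟩
            exact List.ne_nil_of_mem ((PySem.Set.mem_ofList _ x).mpr hx)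
          have hsome : pvB_second low chars
              = some (PySem.List.dedup (pvB_matches low chars)) := by
            unfold pvB_second
            rw [if_pos hlen, if_pos hand,
                if_pos (show 2 ≤ (pvB_matches low chars).length from hms)]
          rw [if_pos hms, pv_third_ne hne, pv_bmain_some si hex hsome]
          rfl
        · have hnone : pvB_second low chars = none := by
            unfold pvB_second
            rw [if_pos hlen, if_pos hand,
                if_neg (show ¬ 2 ≤ (pvB_matches low chars).length from hms)]
          rw [if_neg hms, pv_third_nil, pv_bmain_none si hex hnone]
      · by_cases hwith : PySem.Chars.isIn " with ".toList low = true
        · cases chars with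
          | nil => simp at hlen
          | cons c0 rest =>
            have hA2 : pvA_second low [] (c0 :: rest) = c0 :: pvA_companion low rest := by
              unfold pvA_second
              rw [if_pos ⟨rfl, hlen⟩, if_neg hand, if_pos hwith]
              simp
            have hsome : pvB_second low (c0 :: rest)
                = some (match (c0 :: rest).tail.find? (pvM low) with
                        | some comp => [(c0 :: rest).headI, comp]
                        | none => [(c0 :: rest).headI]) := by
              unfold pvB_second
              rw [if_pos hlen, if_neg hand, if_pos hwith]
            rw [hA2, pv_third_ne (by simp), pv_bmain_some si hex hsome, pv_comp_eq]
            cases hf : rest.find? (pvM low) with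
            | some comp => simp [hf]
            | none => simp [hf]
        · have hA2 : pvA_second low [] chars = [] := by
            unfold pvA_second
            rw [if_pos ⟨rfl, hlen⟩, if_neg hand, if_neg hwith]
          have hnone : pvB_second low chars = none := by
            unfold pvB_second
            rw [if_pos hlen, if_neg hand, if_neg hwith]
          rw [hA2, pv_third_nil, pv_bmain_none si hex hnone]
    · have hA2 : pvA_second low [] chars = [] := by
        unfold pvA_second
        rw [if_neg (fun hc => hlen hc.2)]
      have hnone : pvB_second low chars = none := by
        unfold pvB_second
        rw [if_neg hlen]
      rw [hA2, pv_third_nil, pv_bmain_none si hex hnone]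
  · have hA2 : pvA_second low (pvB_explicit low chars) chars = pvB_explicit low chars := by
      unfold pvA_second
      rw [if_neg (fun hc => hex (List.length_eq_zero_iff.mp hc.1))]
    rw [hA2, pv_third_ne hex, pv_bmain_ex si hex]

-- ===== VERDICT (by name: the statement is the Claim_ definition above) =====
theorem get_characters_in_scene_py_spec : Claim_equal_get_characters_in_scene_py := by
  intro scene_content characters scene_index _
  unfold Spec_get_characters_in_scene_py get_characters_in_scene_py get_characters_in_scene_py_alt
  exact pv_main_eq _ characters scene_index
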